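-- pv_equiv track=rewrite | github.com/craigsimm/pixel-fix | src/pixel_fix/gui/processing.py | _pixel_perfect_candidate
-- ===== SOURCE A (Python) =====
-- def _pixel_perfect_candidate(mask: list[list[bool]], x: int, y: int, phase: int) -> bool:
--     if not mask[y][x]:
--         return False
--     north = y > 0 and mask[y - 1][x]
--     east = x + 1 < len(mask[0]) and mask[y][x + 1]
--     south = y + 1 < len(mask) and mask[y + 1][x]
--     west = x > 0 and mask[y][x - 1]
--     orthogonal = [north, east, south, west]
--     active_neighbors = 0
--     for neighbor_y in range(max(0, y - 1), min(len(mask), y + 2)):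
--         for neighbor_x in range(max(0, x - 1), min(len(mask[0]), x + 2)):
--             if neighbor_x == x and neighbor_y == y:
--                 continue
--             if mask[neighbor_y][neighbor_x]:
--                 active_neighbors += 1
--     if active_neighbors < 2 or active_neighbors > 6:
--         return False
--     if sum(orthogonal) != 2:
--         return False
--     if (north and south) or (east and west):
--         return False
--     ring = orthogonal + [orthogonal[0]]
--     transitions = sum((not current) and following for current, following in zip(ring, ring[1:]))
--     if transitions != 1:
--         return False
--     if phase == 0:
--         if north and east and south:
--             return False
--         if east and south and west:
--             return False
--     else:
--         if north and east and west:
--             return False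
--         if north and south and west:
--             return False
--     return _preserves_local_connectivity(mask, x, y)
--
-- def _preserves_local_connectivity(mask: list[list[bool]], x: int, y: int) -> bool:
--     height = len(mask)
--     width = len(mask[0]) if height else 0
--     neighbors: list[tuple[int, int]] = []
--     for neighbor_y in range(max(0, y - 1), min(height, y + 2)):
--         for neighbor_x in range(max(0, x - 1), min(width, x + 2)):
--             if neighbor_x == x and neighbor_y == y:
--                 continue
--             if mask[neighbor_y][neighbor_x]:
--                 neighbors.append((neighbor_x, neighbor_y))
--     if len(neighbors) <= 1:
--         return True
--     allowed = set(neighbors)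
--     pending = [neighbors[0]]
--     visited: set[tuple[int, int]] = set()
--     while pending:
--         point = pending.pop()
--         if point in visited:
--             continue
--         visited.add(point)
--         px, py = point
--         for neighbor_y in range(max(0, py - 1), min(height, py + 2)):
--             for neighbor_x in range(max(0, px - 1), min(width, px + 2)):
--                 neighbor = (neighbor_x, neighbor_y)
--                 if neighbor in allowed and neighbor not in visited:
--                     pending.append(neighbor)
--     return len(visited) == len(allowed)
-- ===== SOURCE B (Python) =====
-- def _pixel_perfect_candidate(mask: list[list[bool]], x: int, y: int, phase: int) -> bool:
--     if not mask[y][x]: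
--         return False
--     height, width = len(mask), len(mask[0])
--     north = y > 0 and mask[y - 1][x]
--     east = x + 1 < width and mask[y][x + 1]
--     south = y + 1 < height and mask[y + 1][x]
--     west = x > 0 and mask[y][x - 1]
--     # one window scan: foreground neighbours of (x, y) as offsets from the centre
--     offs = [(nx - x, ny - y)
--             for ny in range(max(0, y - 1), min(height, y + 2))
--             for nx in range(max(0, x - 1), min(width, x + 2))
--             if (nx, ny) != (x, y) and mask[ny][nx]]
--     if not (2 <= len(offs) <= 6):
--         return False
--     # exactly two orthogonal neighbours forming a corner (the transition and
--     # phase cascades of the original are implied by this single pattern test)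
--     corner = ((north and east and not south and not west)
--               or (east and south and not north and not west)
--               or (south and west and not north and not east)
--               or (west and north and not east and not south))
--     if not corner:
--         return False
--     return _connected_offsets(offs)
--
--
-- def _connected_offsets(offs: list) -> bool:
--     n = len(offs)
--     if n <= 1:
--         return True
--     parent = list(range(n))
--
--     def find(i: int) -> int:
--         while parent[i] != i:
--             i = parent[i]
--         return i
--
--     for i in range(n):
--         for j in range(i + 1, n):
--             if abs(offs[i][0] - offs[j][0]) <= 1 and abs(offs[i][1] - offs[j][1]) <= 1:
--                 ri, rj = find(i), find(j)
--                 if ri != rj: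
--                     parent[ri] = rj
--     r0 = find(0)
--     return all(find(i) == r0 for i in range(n))
-- ===== Notes on version B (the rewrite author's own statement) =====
-- stated objective: simpler
-- what changed: B scans the 3x3 window once into a list of neighbour offsets, replaces A's sum/opposite-pair/transition/phase cascade by a single corner-pattern test on the four orthogonal flags (the cascade's later checks are logically implied by the earlier ones), and decides local connectivity with union-find over neighbour indices instead of A's DFS flood fill over coordinate sets.
import Mathlib
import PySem

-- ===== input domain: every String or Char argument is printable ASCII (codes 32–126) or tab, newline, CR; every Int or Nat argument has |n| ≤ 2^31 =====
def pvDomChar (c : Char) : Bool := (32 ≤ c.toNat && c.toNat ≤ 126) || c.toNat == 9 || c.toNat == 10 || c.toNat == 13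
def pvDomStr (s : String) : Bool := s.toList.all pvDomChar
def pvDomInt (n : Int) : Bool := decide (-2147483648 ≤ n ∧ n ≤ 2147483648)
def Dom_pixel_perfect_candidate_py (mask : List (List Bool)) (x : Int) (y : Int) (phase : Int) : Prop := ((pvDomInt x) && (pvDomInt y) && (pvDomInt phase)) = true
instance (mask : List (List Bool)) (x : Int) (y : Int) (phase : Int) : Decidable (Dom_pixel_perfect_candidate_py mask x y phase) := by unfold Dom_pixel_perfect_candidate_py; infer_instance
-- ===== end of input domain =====

-- B replaces A's sum/opposite/transition/phase cascade by one corner-pattern test (the later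
-- checks of the cascade are logically implied) and decides local connectivity by union-find
-- over neighbour indices instead of A's DFS flood fill; objective: a simpler, shorter predicate.

-- ===== PORT A =====

-- mask[i] (Python negative-index semantics; the default [] is only reached outside Pre_)
def ppRow (mask : List (List Bool)) (i : Int) : List Bool := (PySem.List.pyGet? mask i).getD []
-- mask[iy][ix] (default false only reached outside Pre_)
def ppPix (mask : List (List Bool)) (iy ix : Int) : Bool :=
  (PySem.List.pyGet? (ppRow mask iy) ix).getD false

-- A's flood-fill loop; the pending stack is head-on-top (Python appends and pops at the tail:
-- the same LIFO order).  Fuel 100 bounds the loop's iterations: the allowed set has ≤ 8 points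
-- (a 3×3 window minus its centre), each visit pushes ≤ 9 candidates, so ≤ 73 pops happen.
def ppDfs (h w : Int) (allowed : PySem.Set (Int × Int)) :
    Nat → List (Int × Int) → PySem.Set (Int × Int) → PySem.Set (Int × Int)
  | 0, _, visited => visited
  | _ + 1, [], visited => visited
  | f + 1, p :: rest, visited =>
    if PySem.Set.contains visited p then ppDfs h w allowed f rest visited
    else
      let visited' := PySem.Set.add visited p
      let pending' := (PySem.List.pyRange (max 0 (p.2 - 1)) (min h (p.2 + 2)) 1).foldl (fun pd ny =>
        (PySem.List.pyRange (max 0 (p.1 - 1)) (min w (p.1 + 2)) 1).foldl (fun pd nx =>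
          if PySem.Set.contains allowed (nx, ny) && !PySem.Set.contains visited' (nx, ny) then
            (nx, ny) :: pd
          else pd) pd) rest
      ppDfs h w allowed f pending' visited'

def preserves_local_connectivity_A (mask : List (List Bool)) (x y : Int) : Bool :=
  let h : Int := mask.length
  let w : Int := if mask.length ≠ 0 then ((PySem.List.pyGet? mask 0).getD []).length else 0
  let neighbors : List (Int × Int) :=
    (PySem.List.pyRange (max 0 (y - 1)) (min h (y + 2)) 1).foldl (fun acc ny =>
      (PySem.List.pyRange (max 0 (x - 1)) (min w (x + 2)) 1).foldl (fun acc nx =>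
        if nx = x ∧ ny = y then acc
        else if ppPix mask ny nx then acc ++ [(nx, ny)] else acc) acc) []
  if neighbors.length ≤ 1 then true
  else
    let allowed := PySem.Set.ofList neighbors
    let visited := ppDfs h w allowed 100 [neighbors.headD (0, 0)] PySem.Set.empty
    visited.length == allowed.length

def pixel_perfect_candidate_py (mask : List (List Bool)) (x : Int) (y : Int) (phase : Int) : Bool :=
  if !ppPix mask y x then false
  else
    let h : Int := mask.length
    let w : Int := ((PySem.List.pyGet? mask 0).getD []).length
    let north := decide (0 < y) && ppPix mask (y - 1) x
    let east := decide (x + 1 < w) && ppPix mask y (x + 1)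
    let south := decide (y + 1 < h) && ppPix mask (y + 1) x
    let west := decide (0 < x) && ppPix mask y (x - 1)
    let orthogonal : List Bool := [north, east, south, west]
    let active : Int := (PySem.List.pyRange (max 0 (y - 1)) (min h (y + 2)) 1).foldl (fun acc ny =>
      (PySem.List.pyRange (max 0 (x - 1)) (min w (x + 2)) 1).foldl (fun acc nx =>
        if nx = x ∧ ny = y then acc
        else if ppPix mask ny nx then acc + 1 else acc) acc) 0
    if active < 2 ∨ active > 6 then false
    else if orthogonal.foldl (fun s b => s + if b then (1 : Int) else 0) 0 ≠ 2 then false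
    else if (north && south) || (east && west) then false
    else
      let ring := orthogonal ++ [(PySem.List.pyGet? orthogonal 0).getD false]
      let transitions : Int :=
        (ring.zip (ring.drop 1)).foldl (fun s p => s + if !p.1 && p.2 then (1 : Int) else 0) 0
      if transitions ≠ 1 then false
      else if phase = 0 then
        if north && east && south then false
        else if east && south && west then false
        else preserves_local_connectivity_A mask x y
      else
        if north && east && west then false
        else if north && south && west then false
        else preserves_local_connectivity_A mask x y

-- ===== PORT B =====

-- naive union-find lookup; the fuel parent.length + 1 covers any root chain in the forest
def ufFind (parent : List Nat) : Nat → Nat → Nat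
  | 0, i => i
  | f + 1, i => let p := parent.getD i i; if p = i then i else ufFind parent f p

def connected_offsets_B (offs : List (Int × Int)) : Bool :=
  let n := offs.length
  if n ≤ 1 then true
  else
    let parent := (List.range n).foldl (fun par i =>
      ((List.range n).drop (i + 1)).foldl (fun par j =>
        let a := offs.getD i (0, 0)
        let b := offs.getD j (0, 0)
        if (a.1 - b.1).natAbs ≤ 1 ∧ (a.2 - b.2).natAbs ≤ 1 then
          let ri := ufFind par (par.length + 1) i
          let rj := ufFind par (par.length + 1) j
          if ri ≠ rj then par.set ri rj else par
        else par) par) (List.range n)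
    let r0 := ufFind parent (parent.length + 1) 0
    (List.range n).all (fun i => ufFind parent (parent.length + 1) i == r0)

def pixel_perfect_candidate_py_alt (mask : List (List Bool)) (x : Int) (y : Int) (phase : Int) : Bool :=
  if !ppPix mask y x then false
  else
    let h : Int := mask.length
    let w : Int := ((PySem.List.pyGet? mask 0).getD []).length
    let north := decide (0 < y) && ppPix mask (y - 1) x
    let east := decide (x + 1 < w) && ppPix mask y (x + 1)
    let south := decide (y + 1 < h) && ppPix mask (y + 1) x
    let west := decide (0 < x) && ppPix mask y (x - 1)
    let offs : List (Int × Int) :=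
      (PySem.List.pyRange (max 0 (y - 1)) (min h (y + 2)) 1).foldl (fun acc ny =>
        (PySem.List.pyRange (max 0 (x - 1)) (min w (x + 2)) 1).foldl (fun acc nx =>
          if ¬(nx = x ∧ ny = y) ∧ ppPix mask ny nx = true then acc ++ [(nx - x, ny - y)]
          else acc) acc) []
    if ¬(2 ≤ offs.length ∧ offs.length ≤ 6) then false
    else
      let corner :=
        (north && east && !south && !west) || (east && south && !north && !west) ||
        (south && west && !north && !east) || (west && north && !east && !south)
      if !corner then false else connected_offsets_B offs

-- ===== PRECONDITION & SPEC =====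

-- Pre_ holds exactly when the Python performs no out-of-range subscript (so it raises no
-- IndexError): the centre read mask[y][x] is in range (Python's negative indices included)
-- and, when that pixel is set, so is every further read the function then performs.
def Pre_pixel_perfect_candidate_py (mask : List (List Bool)) (x : Int) (y : Int) (phase : Int) : Prop :=
  (PySem.List.pyGet? mask y).isSome = true ∧
  (PySem.List.pyGet? (ppRow mask y) x).isSome = true ∧
  (ppPix mask y x = true →
    (0 < y → PySem.Raise.InRange (ppRow mask (y - 1)).length x) ∧
    (x + 1 < ((ppRow mask 0).length : Int) → PySem.Raise.InRange (ppRow mask y).length (x + 1)) ∧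
    (y + 1 < (mask.length : Int) → PySem.Raise.InRange (ppRow mask (y + 1)).length x) ∧
    (0 < x → PySem.Raise.InRange (ppRow mask y).length (x - 1)) ∧
    (∀ ny ∈ PySem.List.pyRange (max 0 (y - 1)) (min (mask.length : Int) (y + 2)) 1,
      ∀ nx ∈ PySem.List.pyRange (max 0 (x - 1)) (min ((ppRow mask 0).length : Int) (x + 2)) 1,
        nx < ((ppRow mask ny).length : Int)))
instance (mask : List (List Bool)) (x : Int) (y : Int) (phase : Int) :
    Decidable (Pre_pixel_perfect_candidate_py mask x y phase) := by
  unfold Pre_pixel_perfect_candidate_py; infer_instance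

def pvWitness_pixel_perfect_candidate_py : List (List Bool) × Int × Int × Int := ([[true]], 0, 0, 0)

def Spec_pixel_perfect_candidate_py (mask : List (List Bool)) (x : Int) (y : Int) (phase : Int) (out : Bool) : Prop := out = pixel_perfect_candidate_py_alt mask x y phase
instance (mask : List (List Bool)) (x : Int) (y : Int) (phase : Int) (out : Bool) : Decidable (Spec_pixel_perfect_candidate_py mask x y phase out) := by unfold Spec_pixel_perfect_candidate_py; infer_instance

-- ===== CLAIM (what is proved, stated in full; the proofs are below) =====
def Claim_equal_pixel_perfect_candidate_py : Prop := ∀ (mask : List (List Bool)) (x : Int) (y : Int) (phase : Int), Dom_pixel_perfect_candidate_py mask x y phase → Pre_pixel_perfect_candidate_py mask x y phase → Spec_pixel_perfect_candidate_py mask x y phase (pixel_perfect_candidate_py mask x y phase)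

-- ===== LEMMAS AND PROOFS =====

theorem ppWitness_ok :
    Dom_pixel_perfect_candidate_py pvWitness_pixel_perfect_candidate_py.1
      pvWitness_pixel_perfect_candidate_py.2.1 pvWitness_pixel_perfect_candidate_py.2.2.1
      pvWitness_pixel_perfect_candidate_py.2.2.2 ∧
    Pre_pixel_perfect_candidate_py pvWitness_pixel_perfect_candidate_py.1
      pvWitness_pixel_perfect_candidate_py.2.1 pvWitness_pixel_perfect_candidate_py.2.2.1
      pvWitness_pixel_perfect_candidate_py.2.2.2 := by decide


-- ---- range clipping ----

theorem ppClipGen (n : Int) : ∀ (k : Nat) (a b : Int), b - a ≤ (k : Int) →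
    PySem.List.pyRange (max 0 a) (min n b) 1 =
      (PySem.List.pyRange a b 1).filter (fun i => decide (0 ≤ i) && decide (i < n)) := by
  intro k
  induction k with
  | zero =>
    intro a b hk
    rw [PySem.List.pyRange_one_eq_nil (by omega), PySem.List.pyRange_one_eq_nil (by omega)]
    rfl
  | succ k ih =>
    intro a b hk
    rcases le_or_gt b a with hba | hab
    · rw [PySem.List.pyRange_one_eq_nil (by omega), PySem.List.pyRange_one_eq_nil (by omega)]
      rfl
    · rw [PySem.List.pyRange_one_cons hab, List.filter_cons]
      rcases lt_or_ge a 0 with ha | ha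
      · have : max 0 a = max 0 (a + 1) := by omega
        rw [this, ih (a + 1) b (by omega)]
        simp [show ¬ (0 ≤ a) by omega]
      · rcases lt_or_ge a n with han | han
        · have h2 := ih (a + 1) b (by omega)
          rw [show max 0 (a + 1) = a + 1 by omega] at h2
          rw [show max 0 a = a by omega, PySem.List.pyRange_one_cons (by omega), h2]
          simp [ha, han]
        · rw [PySem.List.pyRange_one_eq_nil (by omega)]
          have h2 := ih (a + 1) b (by omega)
          rw [PySem.List.pyRange_one_eq_nil (by omega)] at h2
          rw [← h2]
          simp [show ¬ (a < n) by omega]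

theorem ppClip3 (n c : Int) :
    PySem.List.pyRange (max 0 (c - 1)) (min n (c + 2)) 1 =
      [c - 1, c, c + 1].filter (fun i => decide (0 ≤ i) && decide (i < n)) := by
  rw [ppClipGen n 3 (c - 1) (c + 2) (by omega)]
  congr 1
  rw [PySem.List.pyRange_one_cons (by omega), PySem.List.pyRange_one_cons (by omega),
    PySem.List.pyRange_one_cons (by omega), PySem.List.pyRange_one_eq_nil (by omega)]
  norm_num

-- ---- canonical window list ----

def ppT (x y : Int) (p : Int × Int) : Int × Int := (x + p.1, y + p.2)

def ppGuard (mask : List (List Bool)) (x y ny nx : Int) : Bool :=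
  !(decide (nx = x) && decide (ny = y)) && ppPix mask ny nx

-- B's offset list in flatMap normal form
def ppWinO (mask : List (List Bool)) (h w x y : Int) : List (Int × Int) :=
  (PySem.List.pyRange (max 0 (y - 1)) (min h (y + 2)) 1).flatMap (fun ny =>
    ((PySem.List.pyRange (max 0 (x - 1)) (min w (x + 2)) 1).filter (ppGuard mask x y ny)).map
      (fun nx => (nx - x, ny - y)))

theorem ppT_inj (x y : Int) {a b : Int × Int} (h : ppT x y a = ppT x y b) : a = b := by
  simp only [ppT, Prod.mk.injEq] at h
  obtain ⟨ha, hb⟩ := h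
  obtain ⟨a1, a2⟩ := a
  obtain ⟨b1, b2⟩ := b
  simp_all only [Prod.mk.injEq]
  omega

theorem ppGuard_iff (mask : List (List Bool)) (x y ny nx : Int) :
    ppGuard mask x y ny nx = true ↔ ¬(nx = x ∧ ny = y) ∧ ppPix mask ny nx = true := by
  simp [ppGuard]; tauto

theorem collectB_eq (mask : List (List Bool)) (h w x y : Int) :
    (PySem.List.pyRange (max 0 (y - 1)) (min h (y + 2)) 1).foldl (fun acc ny =>
      (PySem.List.pyRange (max 0 (x - 1)) (min w (x + 2)) 1).foldl (fun acc nx =>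
        if ¬(nx = x ∧ ny = y) ∧ ppPix mask ny nx = true then acc ++ [(nx - x, ny - y)]
        else acc) acc) [] = ppWinO mask h w x y := by
  have inner : ∀ ny ∈ PySem.List.pyRange (max 0 (y - 1)) (min h (y + 2)) 1, ∀ acc,
      (PySem.List.pyRange (max 0 (x - 1)) (min w (x + 2)) 1).foldl (fun acc nx =>
        if ¬(nx = x ∧ ny = y) ∧ ppPix mask ny nx = true then acc ++ [(nx - x, ny - y)]
        else acc) acc =
      acc ++ ((PySem.List.pyRange (max 0 (x - 1)) (min w (x + 2)) 1).filter
        (ppGuard mask x y ny)).map (fun nx => (nx - x, ny - y)) := by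
    intro ny _ acc
    refine (PySem.List.foldl_congr_mem' _ _
      (fun acc nx => if ppGuard mask x y ny nx = true then acc ++ [(nx - x, ny - y)] else acc)
      _ ?_).trans (PySem.List.foldl_append_if _ _ _ _)
    intro nx _ acc
    dsimp only
    by_cases hg : ¬(nx = x ∧ ny = y) ∧ ppPix mask ny nx = true
    · rw [if_pos hg, if_pos ((ppGuard_iff mask x y ny nx).2 hg)]
    · rw [if_neg hg, if_neg (fun hgt => hg ((ppGuard_iff mask x y ny nx).1 hgt))]
  refine (PySem.List.foldl_congr_mem' _ _
    (fun acc ny => acc ++ ((PySem.List.pyRange (max 0 (x - 1)) (min w (x + 2)) 1).filter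
      (ppGuard mask x y ny)).map (fun nx => (nx - x, ny - y))) _ inner).trans ?_
  rw [PySem.List.foldl_append_eq_flatMap]
  rfl

theorem collectA_eq (mask : List (List Bool)) (h w x y : Int) :
    (PySem.List.pyRange (max 0 (y - 1)) (min h (y + 2)) 1).foldl (fun acc ny =>
      (PySem.List.pyRange (max 0 (x - 1)) (min w (x + 2)) 1).foldl (fun acc nx =>
        if nx = x ∧ ny = y then acc
        else if ppPix mask ny nx then acc ++ [(nx, ny)] else acc) acc) [] =
      (ppWinO mask h w x y).map (ppT x y) := by
  have inner : ∀ ny ∈ PySem.List.pyRange (max 0 (y - 1)) (min h (y + 2)) 1, ∀ acc,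
      (PySem.List.pyRange (max 0 (x - 1)) (min w (x + 2)) 1).foldl (fun acc nx =>
        if nx = x ∧ ny = y then acc
        else if ppPix mask ny nx then acc ++ [(nx, ny)] else acc) acc =
      acc ++ ((PySem.List.pyRange (max 0 (x - 1)) (min w (x + 2)) 1).filter
        (ppGuard mask x y ny)).map (fun nx => ((nx, ny) : Int × Int)) := by
    intro ny _ acc
    refine (PySem.List.foldl_congr_mem' _ _
      (fun acc nx => if ppGuard mask x y ny nx = true then acc ++ [((nx, ny) : Int × Int)] else acc)
      _ ?_).trans (PySem.List.foldl_append_if _ _ _ _)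
    intro nx _ acc
    dsimp only
    by_cases h1 : nx = x ∧ ny = y
    · rw [if_pos h1, if_neg]
      simp [ppGuard_iff, h1]
    · rw [if_neg h1]
      by_cases h2 : ppPix mask ny nx
      · rw [if_pos h2, if_pos ((ppGuard_iff mask x y ny nx).2 ⟨h1, h2⟩)]
      · rw [if_neg h2, if_neg (fun hgt => h2 ((ppGuard_iff mask x y ny nx).1 hgt).2)]
  refine (PySem.List.foldl_congr_mem' _ _
    (fun acc ny => acc ++ ((PySem.List.pyRange (max 0 (x - 1)) (min w (x + 2)) 1).filter
      (ppGuard mask x y ny)).map (fun nx => ((nx, ny) : Int × Int))) _ inner).trans ?_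
  rw [PySem.List.foldl_append_eq_flatMap]
  rw [List.nil_append, ppWinO, List.map_flatMap]
  have hmm : ∀ ny : Int,
      (((PySem.List.pyRange (max 0 (x - 1)) (min w (x + 2)) 1).filter
        (ppGuard mask x y ny)).map (fun nx => (nx - x, ny - y))).map (ppT x y) =
      ((PySem.List.pyRange (max 0 (x - 1)) (min w (x + 2)) 1).filter
        (ppGuard mask x y ny)).map (fun nx => ((nx, ny) : Int × Int)) := by
    intro ny
    rw [List.map_map]
    refine List.map_congr_left (fun nx _ => ?_)
    simp only [Function.comp, ppT, Prod.mk.injEq]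
    omega
  simp only [hmm]

theorem countA_eq (mask : List (List Bool)) (h w x y : Int) :
    (PySem.List.pyRange (max 0 (y - 1)) (min h (y + 2)) 1).foldl (fun acc ny =>
      (PySem.List.pyRange (max 0 (x - 1)) (min w (x + 2)) 1).foldl (fun acc nx =>
        if nx = x ∧ ny = y then acc
        else if ppPix mask ny nx then acc + 1 else acc) acc) (0 : Int) =
      ((ppWinO mask h w x y).length : Int) := by
  have inner : ∀ ny ∈ PySem.List.pyRange (max 0 (y - 1)) (min h (y + 2)) 1, ∀ acc : Int,
      (PySem.List.pyRange (max 0 (x - 1)) (min w (x + 2)) 1).foldl (fun acc nx =>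
        if nx = x ∧ ny = y then acc
        else if ppPix mask ny nx then acc + 1 else acc) acc =
      acc + (((PySem.List.pyRange (max 0 (x - 1)) (min w (x + 2)) 1).filter
        (ppGuard mask x y ny)).length : Int) := by
    intro ny _ acc
    refine (PySem.List.foldl_congr_mem' _ _
      (fun acc nx => if ppGuard mask x y ny nx = true then acc + 1 else acc) _ ?_).trans
      (by rw [PySem.List.foldl_if_add_one, List.countP_eq_length_filter])
    intro nx _ acc
    dsimp only
    by_cases h1 : nx = x ∧ ny = y
    · rw [if_pos h1, if_neg]
      simp [ppGuard_iff, h1]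
    · rw [if_neg h1]
      by_cases h2 : ppPix mask ny nx
      · rw [if_pos h2, if_pos ((ppGuard_iff mask x y ny nx).2 ⟨h1, h2⟩)]
      · rw [if_neg h2, if_neg (fun hgt => h2 ((ppGuard_iff mask x y ny nx).1 hgt).2)]
  refine (PySem.List.foldl_congr_mem' _ _
    (fun acc ny => acc + (((PySem.List.pyRange (max 0 (x - 1)) (min w (x + 2)) 1).filter
      (ppGuard mask x y ny)).length : Int)) _ inner).trans ?_
  rw [PySem.List.foldl_add, zero_add, ppWinO, List.length_flatMap, Nat.cast_list_sum,
    List.map_map]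
  refine congrArg List.sum (List.map_congr_left fun ny _ => ?_)
  simp

theorem winO_bounds (mask : List (List Bool)) (h w x y : Int) :
    ∀ p ∈ ppWinO mask h w x y, 0 ≤ x + p.1 ∧ x + p.1 < w ∧ 0 ≤ y + p.2 ∧ y + p.2 < h := by
  intro p hp
  simp only [ppWinO, List.mem_flatMap, List.mem_map, List.mem_filter] at hp
  obtain ⟨ny, hny, nx, ⟨hnx, -⟩, rfl⟩ := hp
  rw [PySem.List.mem_pyRange_one] at hny hnx
  refine ⟨by omega, by omega, by omega, by omega⟩

def ppOffs : List (Int × Int) := [(-1,-1),(0,-1),(1,-1),(-1,0),(1,0),(-1,1),(0,1),(1,1)]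

theorem winFull_eq (x y : Int) :
    [y - 1, y, y + 1].flatMap (fun ny =>
      (([x - 1, x, x + 1]).filter (fun nx => !(decide (nx = x) && decide (ny = y)))).map
        (fun nx => ((nx - x, ny - y) : Int × Int))) = ppOffs := by
  simp only [List.flatMap_cons, List.flatMap_nil, List.filter_cons, List.filter_nil,
    List.append_nil]
  simp [show x - 1 ≠ x by omega, show x + 1 ≠ x by omega, show y - 1 ≠ y by omega,
    show y + 1 ≠ y by omega, ppOffs]

theorem winO_sublist (mask : List (List Bool)) (h w x y : Int) :
    (ppWinO mask h w x y).Sublist ppOffs := by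
  rw [ppWinO, ppClip3 h y, ppClip3 w x, ← winFull_eq x y]
  refine List.Sublist.trans
    (List.Sublist.flatMap_right _ (fun ny _ => ?_))
    (List.Sublist.flatMap List.filter_sublist _)
  rw [List.filter_filter]
  exact List.Sublist.map _ (List.monotone_filter_right _ (fun nx hnx => by
    simp only [ppGuard, Bool.and_eq_true] at hnx
    exact hnx.1.1))

-- ---- the DFS with the bounds clipping removed (candidates outside the mask are
-- ---- filtered by the allowed-set membership test anyway) ----

def ppDfsF (allowed : PySem.Set (Int × Int)) :
    Nat → List (Int × Int) → PySem.Set (Int × Int) → PySem.Set (Int × Int)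
  | 0, _, visited => visited
  | _ + 1, [], visited => visited
  | f + 1, p :: rest, visited =>
    if PySem.Set.contains visited p then ppDfsF allowed f rest visited
    else
      let visited' := PySem.Set.add visited p
      let pending' := ([p.2 - 1, p.2, p.2 + 1]).foldl (fun pd ny =>
        ([p.1 - 1, p.1, p.1 + 1]).foldl (fun pd nx =>
          if PySem.Set.contains allowed (nx, ny) && !PySem.Set.contains visited' (nx, ny) then
            (nx, ny) :: pd
          else pd) pd) rest
      ppDfsF allowed f pending' visited'

theorem contains_false_of_not_mem {q : Int × Int} {s : PySem.Set (Int × Int)} (hn : q ∉ s) :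
    PySem.Set.contains s q = false := by
  rw [Bool.eq_false_iff]
  intro hc
  exact hn ((PySem.Set.contains_iff _ _).1 hc)

theorem push_clip (h w : Int) (allowed visited' : PySem.Set (Int × Int))
    (hb : ∀ q ∈ allowed, 0 ≤ q.1 ∧ q.1 < w ∧ 0 ≤ q.2 ∧ q.2 < h) (p : Int × Int)
    (rest : List (Int × Int)) :
    (PySem.List.pyRange (max 0 (p.2 - 1)) (min h (p.2 + 2)) 1).foldl (fun pd ny =>
      (PySem.List.pyRange (max 0 (p.1 - 1)) (min w (p.1 + 2)) 1).foldl (fun pd nx =>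
        if PySem.Set.contains allowed (nx, ny) && !PySem.Set.contains visited' (nx, ny) then
          (nx, ny) :: pd
        else pd) pd) rest =
    ([p.2 - 1, p.2, p.2 + 1]).foldl (fun pd ny =>
      ([p.1 - 1, p.1, p.1 + 1]).foldl (fun pd nx =>
        if PySem.Set.contains allowed (nx, ny) && !PySem.Set.contains visited' (nx, ny) then
          (nx, ny) :: pd
        else pd) pd) rest := by
  have hcf : ∀ (nx ny : Int), ¬(0 ≤ nx ∧ nx < w ∧ 0 ≤ ny ∧ ny < h) →
      PySem.Set.contains allowed (nx, ny) = false := by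
    intro nx ny hout
    exact contains_false_of_not_mem (fun hm => hout (by simpa using hb _ hm))
  simp only [ppClip3]
  rw [← PySem.List.foldl_if_eq_foldl_filter]
  refine PySem.List.foldl_congr_mem' _ _ _ _ ?_
  intro ny _ pd
  dsimp only
  by_cases hy : (decide (0 ≤ ny) && decide (ny < h)) = true
  · rw [if_pos hy]
    rw [← PySem.List.foldl_if_eq_foldl_filter]
    refine PySem.List.foldl_congr_mem' _ _ _ _ ?_
    intro nx _ pd
    dsimp only
    by_cases hx : (decide (0 ≤ nx) && decide (nx < w)) = true
    · rw [if_pos hx]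
    · rw [if_neg hx]
      rw [hcf nx ny (by simp at hx hy; omega)]
      simp
  · rw [if_neg hy]
    refine ((PySem.List.foldl_congr_mem' _ _ (fun pd _ => pd) _ ?_).trans
      (PySem.List.foldl_ignore _ _)).symm
    intro nx _ pd
    dsimp only
    rw [hcf nx ny (by simp at hy; omega)]
    simp

theorem dfs_clip_elim (h w : Int) (allowed : PySem.Set (Int × Int))
    (hb : ∀ q ∈ allowed, 0 ≤ q.1 ∧ q.1 < w ∧ 0 ≤ q.2 ∧ q.2 < h) :
    ∀ (f : Nat) (pending : List (Int × Int)) (visited : PySem.Set (Int × Int)),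
      ppDfs h w allowed f pending visited = ppDfsF allowed f pending visited := by
  intro f
  induction f with
  | zero => intro pending visited; rfl
  | succ f ih =>
    intro pending visited
    cases pending with
    | nil => rfl
    | cons p rest =>
      rw [ppDfs, ppDfsF]
      by_cases hv : PySem.Set.contains visited p = true
      · rw [if_pos hv, if_pos hv, ih]
      · rw [if_neg hv, if_neg hv]
        simp only
        rw [push_clip h w allowed _ hb p rest, ih]
theorem contains_map_ppT (x y : Int) (s : List (Int × Int)) (p : Int × Int) :
    PySem.Set.contains (s.map (ppT x y)) (ppT x y p) = PySem.Set.contains s p := by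
  induction s with
  | nil => rfl
  | cons a t ih =>
    simp only [List.map_cons, PySem.Set.contains_eq_listContains, List.contains_cons] at *
    rw [ih]
    have hb : (ppT x y p == ppT x y a) = (p == a) := by
      by_cases hpa : p = a
      · simp [hpa]
      · have h2 : ppT x y p ≠ ppT x y a := fun hh => hpa (ppT_inj x y hh)
        simp [hpa, h2]
    rw [hb]
theorem add_map_ppT (x y : Int) (s : PySem.Set (Int × Int)) (p : Int × Int) :
    PySem.Set.add (s.map (ppT x y)) (ppT x y p) = (PySem.Set.add s p).map (ppT x y) := by
  simp only [PySem.Set.add, contains_map_ppT]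
  by_cases hc : p ∈ s
  · simp [hc]
  · simp [hc, List.map_append]
theorem foldl_add_map_ppT (x y : Int) :
    ∀ (l : List (Int × Int)) (s : PySem.Set (Int × Int)),
      (l.map (ppT x y)).foldl PySem.Set.add (s.map (ppT x y)) =
        (l.foldl PySem.Set.add s).map (ppT x y) := by
  intro l
  induction l with
  | nil => intro s; rfl
  | cons a t ih =>
    intro s
    simp only [List.map_cons, List.foldl_cons, add_map_ppT, ih]

theorem ofList_map_ppT (x y : Int) (l : List (Int × Int)) :
    PySem.Set.ofList (l.map (ppT x y)) = (PySem.Set.ofList l).map (ppT x y) := by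
  rw [PySem.Set.ofList_eq_foldl, PySem.Set.ofList_eq_foldl]
  exact foldl_add_map_ppT x y l []
theorem row_map_eq (x a : Int) :
    [x + a - 1, x + a, x + a + 1] = ([a - 1, a, a + 1]).map (x + ·) := by
  simp only [List.map_cons, List.map_nil]
  norm_num
  omega

theorem push_map_cols (x y : Int) (alw vis : PySem.Set (Int × Int)) (ny : Int) :
    ∀ (cols : List Int) (pd : List (Int × Int)),
      cols.foldl (fun pd nx =>
        if PySem.Set.contains (alw.map (ppT x y)) (x + nx, y + ny) &&
            !PySem.Set.contains (vis.map (ppT x y)) (x + nx, y + ny) then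
          ((x + nx, y + ny) : Int × Int) :: pd
        else pd) (pd.map (ppT x y)) =
      (cols.foldl (fun pd nx =>
        if PySem.Set.contains alw (nx, ny) && !PySem.Set.contains vis (nx, ny) then
          ((nx, ny) : Int × Int) :: pd
        else pd) pd).map (ppT x y) := by
  intro cols
  induction cols with
  | nil => intro pd; rfl
  | cons c t ih =>
    intro pd
    simp only [List.foldl_cons]
    rw [show ((x + c, y + ny) : Int × Int) = ppT x y (c, ny) from rfl, contains_map_ppT,
      contains_map_ppT]
    by_cases hc : PySem.Set.contains alw (c, ny) && !PySem.Set.contains vis (c, ny)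
    · rw [if_pos hc, if_pos hc,
        show (ppT x y (c, ny) :: pd.map (ppT x y)) = ((c, ny) :: pd).map (ppT x y) from rfl, ih]
    · rw [if_neg hc, if_neg hc, ih]

theorem push_map_rows (x y : Int) (alw vis : PySem.Set (Int × Int)) (cols : List Int) :
    ∀ (rows : List Int) (pd : List (Int × Int)),
      rows.foldl (fun pd ny => cols.foldl (fun pd nx =>
        if PySem.Set.contains (alw.map (ppT x y)) (x + nx, y + ny) &&
            !PySem.Set.contains (vis.map (ppT x y)) (x + nx, y + ny) then
          ((x + nx, y + ny) : Int × Int) :: pd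
        else pd) pd) (pd.map (ppT x y)) =
      (rows.foldl (fun pd ny => cols.foldl (fun pd nx =>
        if PySem.Set.contains alw (nx, ny) && !PySem.Set.contains vis (nx, ny) then
          ((nx, ny) : Int × Int) :: pd
        else pd) pd) pd).map (ppT x y) := by
  intro rows
  induction rows with
  | nil => intro pd; rfl
  | cons r t ih =>
    intro pd
    simp only [List.foldl_cons]
    rw [push_map_cols x y alw vis r cols pd, ih]

theorem dfsF_map (x y : Int) :
    ∀ (f : Nat) (pending : List (Int × Int)) (visited allowed : PySem.Set (Int × Int)),
      ppDfsF (allowed.map (ppT x y)) f (pending.map (ppT x y)) (visited.map (ppT x y)) =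
        (ppDfsF allowed f pending visited).map (ppT x y) := by
  intro f
  induction f with
  | zero => intro pending visited allowed; rfl
  | succ f ih =>
    intro pending visited allowed
    cases pending with
    | nil => rfl
    | cons p rest =>
      simp only [List.map_cons]
      rw [ppDfsF, ppDfsF, contains_map_ppT]
      by_cases hv : PySem.Set.contains visited p = true
      · rw [if_pos hv, if_pos hv, ih]
      · rw [if_neg hv, if_neg hv]
        simp only
        rw [add_map_ppT]
        rw [show ((ppT x y p).2 : Int) = y + p.2 from rfl,
          show ((ppT x y p).1 : Int) = x + p.1 from rfl]
        rw [row_map_eq y p.2]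
        simp only [row_map_eq x p.1]
        rw [List.foldl_map]
        simp only [List.foldl_map]
        rw [push_map_rows x y allowed (PySem.Set.add visited p) [p.1 - 1, p.1, p.1 + 1]
          [p.2 - 1, p.2, p.2 + 1] rest, ih]
-- ---- offset space: A's helper tail as a function of the offset list ----

def ppF (l : List (Int × Int)) : Bool :=
  if l.length ≤ 1 then true
  else
    (ppDfsF (PySem.Set.ofList l) 100 [l.headD (0, 0)] PySem.Set.empty).length ==
      (PySem.Set.ofList l).length

set_option maxHeartbeats 4000000 in
set_option maxRecDepth 10000 in
theorem core_eq : ∀ l ∈ ppOffs.sublists, ppF l = connected_offsets_B l := by decide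

theorem helperA_eq (mask : List (List Bool)) (x y : Int) :
    preserves_local_connectivity_A mask x y =
      connected_offsets_B
        (ppWinO mask (mask.length : Int) (((PySem.List.pyGet? mask 0).getD []).length : Int) x y) := by
  have hw : (if (mask.length ≠ 0) then (((PySem.List.pyGet? mask 0).getD []).length : Int)
      else 0) = (((PySem.List.pyGet? mask 0).getD []).length : Int) := by
    cases mask with
    | nil => simp [PySem.List.pyGet?]
    | cons r t => simp
  simp only [preserves_local_connectivity_A]
  rw [hw, collectA_eq mask (mask.length : Int) (((PySem.List.pyGet? mask 0).getD []).length : Int) x y,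
    List.length_map]
  set L := ppWinO mask (mask.length : Int) (((PySem.List.pyGet? mask 0).getD []).length : Int) x y with hLdef
  by_cases hlen : L.length ≤ 1
  · rw [if_pos hlen, connected_offsets_B, if_pos hlen]
  · rw [if_neg hlen, ofList_map_ppT]
    have hbounds : ∀ q ∈ (PySem.Set.ofList L).map (ppT x y),
        0 ≤ q.1 ∧ q.1 < (((PySem.List.pyGet? mask 0).getD []).length : Int) ∧
        0 ≤ q.2 ∧ q.2 < (mask.length : Int) := by
      intro q hq
      obtain ⟨p, hp, rfl⟩ := List.mem_map.1 hq
      have hpL : p ∈ L := (PySem.Set.mem_ofList _ _).1 hp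
      have := winO_bounds mask (mask.length : Int)
        (((PySem.List.pyGet? mask 0).getD []).length : Int) x y p hpL
      exact ⟨this.1, this.2.1, this.2.2.1, this.2.2.2⟩
    rw [dfs_clip_elim (mask.length : Int) (((PySem.List.pyGet? mask 0).getD []).length : Int)
      _ hbounds]
    obtain ⟨o, t, hL⟩ : ∃ o t, L = o :: t := by
      cases hc : L with
      | nil => rw [hc] at hlen; simp at hlen
      | cons o t => exact ⟨o, t, rfl⟩
    rw [hL]
    rw [show ((o :: t).map (ppT x y)).headD (0, 0) = ppT x y o from rfl,
      show [ppT x y o] = [o].map (ppT x y) from rfl,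
      show (PySem.Set.empty : PySem.Set (Int × Int)) =
        (PySem.Set.empty : PySem.Set (Int × Int)).map (ppT x y) from rfl,
      dfsF_map, List.length_map, List.length_map]
    have hsubl : (o :: t) ∈ ppOffs.sublists := by
      rw [List.mem_sublists, ← hL]
      exact winO_sublist mask (mask.length : Int)
        (((PySem.List.pyGet? mask 0).getD []).length : Int) x y
    have hcore := core_eq (o :: t) hsubl
    rw [ppF] at hcore
    rw [hL] at hlen
    rw [if_neg hlen] at hcore
    exact hcore

theorem chain_eq (n e s w k : Bool) (phase cnt : Int) (m : Nat) (hm : cnt = (m : Int)) :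
    (if cnt < 2 ∨ cnt > 6 then false
     else if ([n, e, s, w].foldl (fun s b => s + if b then (1 : Int) else 0) 0) ≠ 2 then false
     else if (n && s) || (e && w) then false
     else
       let ring := [n, e, s, w] ++ [(PySem.List.pyGet? [n, e, s, w] 0).getD false]
       let transitions : Int :=
         (ring.zip (ring.drop 1)).foldl (fun t p => t + if !p.1 && p.2 then (1 : Int) else 0) 0
       if transitions ≠ 1 then false
       else if phase = 0 then
         if n && e && s then false
         else if e && s && w then false
         else k
       else
         if n && e && w then false
         else if n && s && w then false
         else k) =
    (if ¬(2 ≤ m ∧ m ≤ 6) then false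
     else if !((n && e && !s && !w) || (e && s && !n && !w) ||
               (s && w && !n && !e) || (w && n && !e && !s)) then false
     else k) := by
  by_cases hc : cnt < 2 ∨ cnt > 6
  · rw [if_pos hc, if_pos (show ¬(2 ≤ m ∧ m ≤ 6) by omega)]
  · rw [if_neg hc, if_neg (show ¬¬(2 ≤ m ∧ m ≤ 6) by omega)]
    by_cases hp : phase = 0
    · simp only [if_pos hp]; revert n e s w k; decide
    · simp only [if_neg hp]; revert n e s w k; decide

-- ===== VERDICT (by name: the statement is the Claim_ definition above) =====
theorem pixel_perfect_candidate_py_spec : Claim_equal_pixel_perfect_candidate_py := by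
  intro mask x y phase _ _
  unfold Spec_pixel_perfect_candidate_py
  unfold pixel_perfect_candidate_py pixel_perfect_candidate_py_alt
  cases hpix : ppPix mask y x with
  | false => simp
  | true =>
    simp only [Bool.not_true, Bool.false_eq_true, if_false]
    rw [collectB_eq mask (mask.length : Int) (((PySem.List.pyGet? mask 0).getD []).length : Int) x y,
      countA_eq mask (mask.length : Int) (((PySem.List.pyGet? mask 0).getD []).length : Int) x y,
      helperA_eq mask x y]
    exact chain_eq _ _ _ _ _ phase _ _ rfl
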